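-- pv_equiv track=rewrite | github.com/reige012/assignment-17 | answers/AndreMonc/task3.py | max_cuts
-- ===== SOURCE A (Python) =====
-- def max_cuts(enz_cut_sites, list_of_used_enzymes):
--     number_of_cuts = []
--     for single_cut_site_list in enz_cut_sites:
--         number_of_cuts.append(len(single_cut_site_list))
--     maxval_cuts = max(number_of_cuts)
--     max_cut_indices = [ind for ind, val in enumerate(number_of_cuts) if val == maxval_cuts]
--     elongated_maxval_cuts = [maxval_cuts]*(len(max_cut_indices))
--     max_cut_enzymes = []
--     for index in max_cut_indices:
--         max_cut_enzymes.append(list_of_used_enzymes[index])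
--     enz_cuts_dict_max = dict(zip(max_cut_enzymes, elongated_maxval_cuts))
--     return enz_cuts_dict_max
-- ===== SOURCE B (Python) =====
-- def max_cuts(enz_cut_sites, list_of_used_enzymes):
--     best = None
--     result = {}
--     for i, sites in enumerate(enz_cut_sites):
--         cuts = len(sites)
--         if best is None or cuts > best:
--             best = cuts
--             result = {list_of_used_enzymes[i]: cuts}
--         elif cuts == best:
--             result[list_of_used_enzymes[i]] = cuts
--     return result
-- ===== Notes on version B (the rewrite author's own statement) =====
-- stated objective: simpler
-- what changed: Replaces A's five passes (build lengths list, max(), filter indices, replicate values, zip into dict) with a single streaming scan that keeps the running best length and a result dict, resetting the dict whenever a strictly larger cut count appears.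
import Mathlib
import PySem

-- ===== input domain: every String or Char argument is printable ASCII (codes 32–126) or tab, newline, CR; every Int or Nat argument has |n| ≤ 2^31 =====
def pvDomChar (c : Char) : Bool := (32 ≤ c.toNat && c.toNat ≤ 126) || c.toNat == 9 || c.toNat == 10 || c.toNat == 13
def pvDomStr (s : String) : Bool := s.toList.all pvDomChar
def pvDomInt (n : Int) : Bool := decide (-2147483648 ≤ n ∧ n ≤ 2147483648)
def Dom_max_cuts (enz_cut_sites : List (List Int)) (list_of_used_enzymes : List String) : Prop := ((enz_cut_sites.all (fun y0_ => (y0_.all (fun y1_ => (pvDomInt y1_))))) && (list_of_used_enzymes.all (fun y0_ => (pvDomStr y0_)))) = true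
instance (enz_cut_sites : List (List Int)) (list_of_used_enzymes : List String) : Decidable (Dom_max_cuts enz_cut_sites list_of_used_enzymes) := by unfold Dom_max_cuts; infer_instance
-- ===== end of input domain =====

-- B replaces A's five passes (lengths list, max(), index filter, replicate, zip-to-dict)
-- with one streaming scan keeping the running best and a result dict that resets on a new maximum.

-- ===== PORT A =====
def max_cuts (enz_cut_sites : List (List Int)) (list_of_used_enzymes : List String) : List (String × Int) :=
  let number_of_cuts : List Int :=
    enz_cut_sites.foldl (fun acc single_cut_site_list => acc ++ [(single_cut_site_list.length : Int)]) []
  match PySem.List.max? number_of_cuts (fun v => v) with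
  | none => []  -- max([]) raises ValueError: such inputs are excluded by Pre_max_cuts
  | some maxval_cuts =>
    let max_cut_indices : List Int :=
      ((PySem.List.enumerate number_of_cuts).filter (fun p => p.2 == maxval_cuts)).map (fun p => p.1)
    let elongated_maxval_cuts : List Int := List.replicate max_cut_indices.length maxval_cuts
    -- list_of_used_enzymes[index]: out-of-range raises IndexError, excluded by Pre_max_cuts (pyGetD default unreachable there)
    let max_cut_enzymes : List String :=
      max_cut_indices.foldl (fun acc index => acc ++ [PySem.List.pyGetD list_of_used_enzymes index ""]) []
    (PySem.Dict.ofList (max_cut_enzymes.zip elongated_maxval_cuts)).items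

-- ===== PORT B =====
def max_cuts_alt (enz_cut_sites : List (List Int)) (list_of_used_enzymes : List String) : List (String × Int) :=
  let final :=
    (PySem.List.enumerate enz_cut_sites).foldl
      (fun (st : Option Int × PySem.Dict String Int) p =>
        let cuts : Int := p.2.length
        match st.1 with
        | none =>
          (some cuts, PySem.Dict.insert PySem.Dict.empty (PySem.List.pyGetD list_of_used_enzymes p.1 "") cuts)
        | some best =>
          if best < cuts then
            (some cuts, PySem.Dict.insert PySem.Dict.empty (PySem.List.pyGetD list_of_used_enzymes p.1 "") cuts)
          else if cuts == best then
            (st.1, PySem.Dict.insert st.2 (PySem.List.pyGetD list_of_used_enzymes p.1 "") cuts)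
          else st)
      (none, PySem.Dict.empty)
  final.2.items

-- ===== PRECONDITION & SPEC =====
-- Pre_ = exactly the inputs on which Python A returns: a nonempty list of cut-site lists, and
-- every index attaining the maximal length is a valid index into list_of_used_enzymes
-- (on the empty list A's max([]) raises ValueError; on an out-of-range index it raises IndexError).
def Pre_max_cuts (enz_cut_sites : List (List Int)) (list_of_used_enzymes : List String) : Prop :=
  enz_cut_sites ≠ [] ∧
    ∀ k : Fin enz_cut_sites.length,
      (∀ l ∈ enz_cut_sites, l.length ≤ enz_cut_sites[k].length) → (k : Nat) < list_of_used_enzymes.length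
instance (enz_cut_sites : List (List Int)) (list_of_used_enzymes : List String) : Decidable (Pre_max_cuts enz_cut_sites list_of_used_enzymes) := by unfold Pre_max_cuts; infer_instance
def pvWitness_max_cuts : List (List Int) × List String := ([[1, 4], [2]], ["EcoRI", "BamHI"])

def Spec_max_cuts (enz_cut_sites : List (List Int)) (list_of_used_enzymes : List String) (out : List (String × Int)) : Prop := out = max_cuts_alt enz_cut_sites list_of_used_enzymes
instance (enz_cut_sites : List (List Int)) (list_of_used_enzymes : List String) (out : List (String × Int)) : Decidable (Spec_max_cuts enz_cut_sites list_of_used_enzymes out) := by unfold Spec_max_cuts; infer_instance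

-- ===== CLAIM (what is proved, stated in full; the proofs are below) =====
def Claim_equal_max_cuts : Prop := ∀ (enz_cut_sites : List (List Int)) (list_of_used_enzymes : List String), Dom_max_cuts enz_cut_sites list_of_used_enzymes → Pre_max_cuts enz_cut_sites list_of_used_enzymes → Spec_max_cuts enz_cut_sites list_of_used_enzymes (max_cuts enz_cut_sites list_of_used_enzymes)

-- ===== LEMMAS AND PROOFS =====

-- Python name lookup at index i (in range under Pre_)
def pvGetter (names : List String) (i : Int) : String := PySem.List.pyGetD names i ""

-- the dict {names[i]: M for i in idxs} built by repeated insertion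
def pvDictIns (names : List String) (M : Int) (idxs : List Int) : PySem.Dict String Int :=
  idxs.foldl (fun d i => PySem.Dict.insert d (pvGetter names i) M) PySem.Dict.empty

-- the indices of ls whose value equals M (A's max_cut_indices)
def pvMaxIdxs (ls : List Int) (M : Int) : List Int :=
  ((PySem.List.enumerate ls).filter (fun p => p.2 == M)).map (fun p => p.1)

-- B's loop body, expressed on (index, length) pairs
def pvStep (names : List String) (st : Option Int × PySem.Dict String Int) (p : Int × Int) :
    Option Int × PySem.Dict String Int :=
  match st.1 with
  | none => (some p.2, PySem.Dict.insert PySem.Dict.empty (pvGetter names p.1) p.2)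
  | some best =>
    if best < p.2 then (some p.2, PySem.Dict.insert PySem.Dict.empty (pvGetter names p.1) p.2)
    else if p.2 == best then (st.1, PySem.Dict.insert st.2 (pvGetter names p.1) p.2)
    else st

theorem pvEnum_map {α β : Type} (xs : List α) (f : α → β) (s : Int) :
    PySem.List.enumerate (xs.map f) s = (PySem.List.enumerate xs s).map (fun p => (p.1, f p.2)) := by
  induction xs generalizing s with
  | nil => simp [PySem.List.enumerate]
  | cons x xs ih => simp [PySem.List.enumerate_cons, ih]

theorem pvAltChar (enz : List (List Int)) (names : List String) :
    max_cuts_alt enz names =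
      ((PySem.List.enumerate (enz.map (fun l => (l.length : Int)))).foldl (pvStep names)
        (none, PySem.Dict.empty)).2.items := by
  unfold max_cuts_alt
  rw [pvEnum_map, List.foldl_map]
  rfl

theorem pvZipRep {α β : Type} (g : α → β) (v : Int) (l : List α) :
    (l.map g).zip (List.replicate l.length v) = l.map (fun i => (g i, v)) := by
  induction l with
  | nil => simp
  | cons x xs ih => simpa [List.replicate_succ] using ih

theorem pvAChar (enz : List (List Int)) (names : List String) (M : Int)
    (hM : PySem.List.max? (enz.map (fun l => (l.length : Int))) (fun v => v) = some M) :
    max_cuts enz names =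
      (pvDictIns names M (pvMaxIdxs (enz.map (fun l => (l.length : Int))) M)).items := by
  unfold max_cuts
  simp only [PySem.List.foldl_append_singleton_eq_map, List.nil_append, hM]
  have hz := pvZipRep (fun i => PySem.List.pyGetD names i "") M
      (pvMaxIdxs (enz.map (fun l => (l.length : Int))) M)
  simp only [pvMaxIdxs] at hz
  rw [hz]
  simp only [PySem.Dict.ofList, PySem.Dict.update, List.foldl_map]
  unfold pvDictIns pvMaxIdxs pvGetter
  rw [List.foldl_map]

theorem pvMax?App (a : Int) (t : List Int) (x : Int) :
    PySem.List.max? ((a :: t) ++ [x]) (fun v => v) = some (max (t.foldl max a) x) := by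
  rw [List.cons_append, PySem.List.max?_id_cons, List.foldl_append]
  simp

theorem pvMaxIdxs_app (ls : List Int) (x M : Int) :
    pvMaxIdxs (ls ++ [x]) M =
      pvMaxIdxs ls M ++ (if x = M then [((ls.length : Int))] else []) := by
  unfold pvMaxIdxs
  rw [PySem.List.enumerate_append]
  by_cases hx : x = M <;>
    simp [PySem.List.enumerate, List.filter_append, hx]

theorem pvDictIns_app (names : List String) (M : Int) (idxs : List Int) (n : Int) :
    pvDictIns names M (idxs ++ [n]) =
      PySem.Dict.insert (pvDictIns names M idxs) (pvGetter names n) M := by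
  unfold pvDictIns
  rw [List.foldl_append]
  rfl

theorem pvKey (names : List String) (ys : List Int) :
    ∀ (x M : Int),
      PySem.List.max? (ys ++ [x]) (fun v => v) = some M →
      (PySem.List.enumerate (ys ++ [x])).foldl (pvStep names) (none, PySem.Dict.empty)
        = (some M, pvDictIns names M (pvMaxIdxs (ys ++ [x]) M)) := by
  induction ys using List.reverseRecOn with
  | nil =>
    intro x M h
    simp only [List.nil_append] at h ⊢
    rw [PySem.List.max?_id_cons] at h
    simp only [List.foldl_nil, Option.some.injEq] at h
    subst h
    simp [PySem.List.enumerate, pvStep, pvMaxIdxs, pvDictIns]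
  | append_singleton zs y ih =>
    intro x M h
    obtain ⟨a, t, hls⟩ :=
      List.exists_cons_of_ne_nil (List.append_ne_nil_of_right_ne_nil zs (by simp : [y] ≠ []))
    have hmax' : PySem.List.max? (zs ++ [y]) (fun v => v) = some (t.foldl max a) := by
      rw [hls, PySem.List.max?_id_cons]
    have hMval : M = max (t.foldl max a) x := by
      rw [hls, pvMax?App] at h
      exact (Option.some.injEq _ _).mp h.symm
    have hfold := ih y (t.foldl max a) hmax'
    have henum : PySem.List.enumerate ((zs ++ [y]) ++ [x]) =
        PySem.List.enumerate (zs ++ [y]) ++ [(((zs ++ [y]).length : Int), x)] := by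
      rw [PySem.List.enumerate_append]
      simp [PySem.List.enumerate]
    have hbound : ∀ p ∈ PySem.List.enumerate (zs ++ [y]), p.2 ≤ t.foldl max a := by
      intro p hp
      exact PySem.List.max?_isMax hmax' p.2
        (by
          obtain ⟨k, hk, rfl⟩ := (PySem.List.mem_enumerate_iff (zs ++ [y]) 0 p).mp hp
          exact List.getElem_mem hk)
    rw [henum, List.foldl_append, hfold, List.foldl_cons, List.foldl_nil]
    rcases lt_trichotomy (t.foldl max a) x with hlt | heq | hgt
    · -- new strict maximum: B resets its dict; only the new index attains M
      have hMx : M = x := by rw [hMval]; exact max_eq_right hlt.le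
      subst hMx
      have hnil : pvMaxIdxs (zs ++ [y]) M = [] := by
        unfold pvMaxIdxs
        rw [List.map_eq_nil_iff, List.filter_eq_nil_iff]
        intro p hp
        have := hbound p hp
        simp only [beq_iff_eq]
        omega
      rw [pvMaxIdxs_app (zs ++ [y]) M M, hnil, if_pos rfl, List.nil_append]
      simp only [pvStep]
      rw [if_pos hlt]
      rfl
    · -- tie with the running maximum: B inserts into its dict
      have hMx : M = x := by rw [hMval, heq, max_self]
      subst hMx
      rw [pvMaxIdxs_app (zs ++ [y]) M M, if_pos rfl, pvDictIns_app]
      simp only [pvStep]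
      rw [if_neg (by omega : ¬ t.foldl max a < M),
        if_pos (by simp only [beq_iff_eq]; omega : (M == t.foldl max a) = true), heq]
    · -- strictly smaller: B leaves its state unchanged, the new index does not attain M
      have hMx : M = t.foldl max a := by rw [hMval]; exact max_eq_left hgt.le
      rw [pvMaxIdxs_app (zs ++ [y]) x M, if_neg (by omega : ¬ x = M), List.append_nil]
      simp only [pvStep]
      rw [if_neg (by omega : ¬ t.foldl max a < x),
        if_neg (by simp only [beq_iff_eq]; omega : ¬ ((x == t.foldl max a) = true)), hMx]

-- ===== VERDICT (by name: the statement is the Claim_ definition above) =====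
theorem max_cuts_spec : Claim_equal_max_cuts := by
  intro enz names _ hpre
  unfold Spec_max_cuts
  have hne : enz.map (fun l => (l.length : Int)) ≠ [] := by
    simpa using hpre.1
  set ls := enz.map (fun l => (l.length : Int)) with hlsdef
  obtain ⟨M, hM⟩ : ∃ M, PySem.List.max? ls (fun v => v) = some M := by
    cases hmx : PySem.List.max? ls (fun v => v) with
    | none => exact absurd ((PySem.List.max?_eq_none_iff ls _).mp hmx) hne
    | some m => exact ⟨m, rfl⟩
  have hsplit : ls.dropLast ++ [ls.getLast hne] = ls := List.dropLast_append_getLast hne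
  have hkey := pvKey names ls.dropLast (ls.getLast hne) M (by rw [hsplit]; exact hM)
  rw [hsplit] at hkey
  rw [pvAChar enz names M hM, pvAltChar enz names, ← hlsdef, hkey]
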